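-- pv_equiv track=rewrite | github.com/KazukiOnodera/KaggleDays | py/utils_nlp.py | quadterms
-- ===== SOURCE A (Python) =====
-- def unigrams(words):
--     """
--         Input: a list of words, e.g., ["I", "am", "Denny"]
--         Output: a list of unigram
--     """
--     assert type(words) == list
--     return words
--
-- def uniterms(words):
--     return unigrams(words)
--
-- def biterms(words, join_string):
--     """
--         Input: a list of words, e.g., ["I", "am", "Denny", "boy"]
--         Output: a list of biterm, e.g., ["I_am", "I_Denny", "I_boy", "am_Denny", "am_boy", "Denny_boy"]
--         I use _ as join_string for this example.
--     """
--     assert type(words) == list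
--     L = len(words)
--     if L > 1:
--         lst = []
--         for i in range(L-1):
--             for j in range(i+1,L):
--                 lst.append( join_string.join([words[i], words[j]]) )
--     else:
--         # set it as uniterm
--         lst = uniterms(words)
--     return lst
--
-- def triterms(words, join_string):
--     """
--         Input: a list of words, e.g., ["I", "am", "Denny", "boy"]
--         Output: a list of triterm, e.g., ["I_am_Denny", "I_am_boy", "I_Denny_boy", "am_Denny_boy"]
--         I use _ as join_string for this example.
--     """
--     assert type(words) == list
--     L = len(words)
--     if L > 2:
--         lst = []
--         for i in range(L-2):
--             for j in range(i+1,L-1):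
--                 for k in range(j+1,L):
--                     lst.append( join_string.join([words[i], words[j], words[k]]) )
--     else:
--         # set it as biterm
--         lst = biterms(words, join_string)
--     return lst
--
-- def quadterms(words, join_string):
--     """
--         Input: a list of words, e.g., ["I", "am", "Denny", "boy", "ha"]
--         Output: a list of fourterm, e.g., ["I_am_Denny_boy", "I_am_Denny_ha", "I_am_boy_ha", "I_Denny_boy_ha", "am_Denny_boy_ha"]
--         I use _ as join_string for this example.
--     """
--     assert type(words) == list
--     L = len(words)
--     if L > 3:
--         lst = []
--         for i in range(L-3):
--             for j in range(i+1,L-2):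
--                 for k in range(j+1,L-1):
--                     for l in range(k+1,L):
--                         lst.append( join_string.join([words[i], words[j], words[k], words[l]]) )
--     else:
--         # set it as triterm
--         lst = triterms(words, join_string)
--     return lst
-- ===== SOURCE B (Python) =====
-- def _combinations(words, k):
--     # all k-element combinations of words, in itertools.combinations order
--     if k == 0:
--         return [()]
--     if not words:
--         return []
--     rest = words[1:]
--     return [(words[0],) + c for c in _combinations(rest, k - 1)] + _combinations(rest, k)
--
-- def quadterms(words, join_string):
--     assert type(words) == list
--     k = min(len(words), 4)
--     if k < 2:
--         return words
--     return [join_string.join(c) for c in _combinations(words, k)]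
-- ===== Notes on version B (the rewrite author's own statement) =====
-- stated objective: simpler
-- what changed: Replaces the 4-nested index loops plus the recursive triterms/biterms/uniterms fallback chain by one generalized recursive k-combinations builder with k = min(len(words), 4), joining each combination once.
import Mathlib
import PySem

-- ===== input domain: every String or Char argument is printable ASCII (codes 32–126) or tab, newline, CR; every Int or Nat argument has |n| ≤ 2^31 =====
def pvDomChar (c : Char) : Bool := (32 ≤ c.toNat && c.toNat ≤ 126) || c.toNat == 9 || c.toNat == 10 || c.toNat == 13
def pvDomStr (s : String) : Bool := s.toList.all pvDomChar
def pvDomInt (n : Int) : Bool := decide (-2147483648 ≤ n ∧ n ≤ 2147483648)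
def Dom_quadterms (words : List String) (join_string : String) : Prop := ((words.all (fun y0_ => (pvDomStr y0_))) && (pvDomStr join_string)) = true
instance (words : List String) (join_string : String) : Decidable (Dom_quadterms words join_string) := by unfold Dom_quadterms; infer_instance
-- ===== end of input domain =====

-- B replaces A's 4-nested loops and recursive tri/bi/uni fallback by one recursive
-- k-combinations builder with k = min(len(words), 4); same return value, not faster.

-- ===== PORT A =====
def unigrams (words : List String) : List String := words

def uniterms (words : List String) : List String := unigrams words

def biterms (words : List String) (join_string : String) : List String :=
  if PySem.List.len words > 1 then
    (PySem.List.pyRange 0 (PySem.List.len words - 1) 1).foldl (fun lst i =>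
      (PySem.List.pyRange (i + 1) (PySem.List.len words) 1).foldl (fun lst j =>
        lst ++ [PySem.Str.join join_string
          [PySem.List.pyGetD words i "", PySem.List.pyGetD words j ""]]) lst) []
  else uniterms words

def triterms (words : List String) (join_string : String) : List String :=
  if PySem.List.len words > 2 then
    (PySem.List.pyRange 0 (PySem.List.len words - 2) 1).foldl (fun lst i =>
      (PySem.List.pyRange (i + 1) (PySem.List.len words - 1) 1).foldl (fun lst j =>
        (PySem.List.pyRange (j + 1) (PySem.List.len words) 1).foldl (fun lst k =>
          lst ++ [PySem.Str.join join_string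
            [PySem.List.pyGetD words i "", PySem.List.pyGetD words j "",
             PySem.List.pyGetD words k ""]]) lst) lst) []
  else biterms words join_string

def quadterms (words : List String) (join_string : String) : List String :=
  if PySem.List.len words > 3 then
    (PySem.List.pyRange 0 (PySem.List.len words - 3) 1).foldl (fun lst i =>
      (PySem.List.pyRange (i + 1) (PySem.List.len words - 2) 1).foldl (fun lst j =>
        (PySem.List.pyRange (j + 1) (PySem.List.len words - 1) 1).foldl (fun lst k =>
          (PySem.List.pyRange (k + 1) (PySem.List.len words) 1).foldl (fun lst l =>
            lst ++ [PySem.Str.join join_string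
              [PySem.List.pyGetD words i "", PySem.List.pyGetD words j "",
               PySem.List.pyGetD words k "", PySem.List.pyGetD words l ""]]) lst) lst) lst) []
  else triterms words join_string

-- ===== PORT B =====
-- _combinations from Source B: all k-combinations, in itertools order
def pvCombs : Nat → List String → List (List String)
  | 0, _ => [[]]
  | _ + 1, [] => []
  | k + 1, x :: xs => (pvCombs k xs).map (fun c => x :: c) ++ pvCombs (k + 1) xs

def quadterms_alt (words : List String) (join_string : String) : List String :=
  let k : Int := min (PySem.List.len words) 4
  if k < 2 then words
  else (pvCombs k.toNat words).map (fun c => PySem.Str.join join_string c)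

-- ===== PRECONDITION & SPEC =====
def Spec_quadterms (words : List String) (join_string : String) (out : List String) : Prop := out = quadterms_alt words join_string
instance (words : List String) (join_string : String) (out : List String) : Decidable (Spec_quadterms words join_string out) := by unfold Spec_quadterms; infer_instance

-- ===== CLAIM (what is proved, stated in full; the proofs are below) =====
def Claim_equal_quadterms : Prop := ∀ (words : List String) (join_string : String), Dom_quadterms words join_string → Spec_quadterms words join_string (quadterms words join_string)

-- ===== LEMMAS AND PROOFS =====

-- A's nested loops, written with an already-chosen prefix: depth n+1 remaining levels.
def pvNest (js : String) (ws : List String) : Nat → List String → Int → List String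
  | 0, pre, a =>
      (PySem.List.pyRange a (PySem.List.len ws) 1).map
        (fun l => PySem.Str.join js (pre ++ [PySem.List.pyGetD ws l ""]))
  | n + 1, pre, a =>
      (PySem.List.pyRange a (PySem.List.len ws - ((n : Int) + 1)) 1).flatMap
        (fun i => pvNest js ws n (pre ++ [PySem.List.pyGetD ws i ""]) (i + 1))

lemma pvFlattenMapSingleton {α β : Type} (l : List α) (f : α → β) :
    (l.map (fun x => [f x])).flatten = l.map f := by
  induction l <;> simp_all

lemma pvFlatMapEq {α β : Type} (l : List α) (f : α → List β) :
    l.flatMap f = (l.map f).flatten := by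
  induction l <;> simp_all

lemma pvCombs_eq_nil : ∀ (xs : List String) (k : Nat), xs.length < k → pvCombs k xs = [] := by
  intro xs
  induction xs with
  | nil =>
    intro k h
    match k, h with
    | k + 1, _ => rfl
  | cons x xs ih =>
    intro k h
    match k, h with
    | k + 1, h =>
      simp only [pvCombs]
      rw [ih k (by simp at h; omega), ih (k + 1) (by simp at h; omega)]
      rfl

lemma pvCombs_one (xs : List String) : pvCombs 1 xs = xs.map (fun y => [y]) := by
  induction xs with
  | nil => rfl
  | cons x xs ih => simp [pvCombs, ih]

lemma pvMaster (js : String) (ws : List String) :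
    ∀ (n : Nat) (d pre : List String) (a : Int), 0 ≤ a → ws.drop a.toNat = d →
      pvNest js ws n pre a =
        (pvCombs (n + 1) d).map (fun c => PySem.Str.join js (pre ++ c)) := by
  intro n
  induction n with
  | zero =>
    intro d pre a ha hd
    simp only [pvNest]
    have h1 : (PySem.List.pyRange a (PySem.List.len ws) 1).map
        (fun j => PySem.List.pyGetD ws j "") = ws.drop a.toNat :=
      PySem.List.map_pyGetD_pyRange ws "" ha
    calc (PySem.List.pyRange a (PySem.List.len ws) 1).map
            (fun l => PySem.Str.join js (pre ++ [PySem.List.pyGetD ws l ""]))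
        = ((PySem.List.pyRange a (PySem.List.len ws) 1).map
            (fun j => PySem.List.pyGetD ws j "")).map
            (fun y => PySem.Str.join js (pre ++ [y])) := by rw [List.map_map]; rfl
      _ = d.map (fun y => PySem.Str.join js (pre ++ [y])) := by rw [h1, hd]
      _ = (pvCombs 1 d).map (fun c => PySem.Str.join js (pre ++ c)) := by
            rw [pvCombs_one, List.map_map]; rfl
  | succ n ih =>
    intro d
    induction d with
    | nil =>
      intro pre a ha hd
      have hlen : ws.length ≤ a.toNat := List.drop_eq_nil_iff.mp hd
      simp only [pvNest]
      rw [PySem.List.pyRange_one_eq_nil (by rw [PySem.List.len_eq]; omega)]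
      rfl
    | cons y d' ihd =>
      intro pre a ha hd
      have halen : a.toNat < ws.length := by
        by_contra h
        have hnil : ws.drop a.toNat = [] := List.drop_eq_nil_iff.mpr (by omega)
        rw [hnil] at hd
        simp at hd
      have hl : ws.length - a.toNat = d'.length + 1 := by
        have := congrArg List.length hd
        simpa using this
      simp only [pvNest]
      by_cases hab : (ws.length : Int) - ((n : Int) + 1) ≤ a
      · rw [PySem.List.pyRange_one_eq_nil (by rw [PySem.List.len_eq]; omega)]
        have hdl : (y :: d').length < n + 1 + 1 := by simp; omega
        rw [pvCombs_eq_nil _ _ hdl]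
        rfl
      · have hcons : ws[a.toNat] :: ws.drop (a.toNat + 1) = y :: d' := by
          rw [← List.drop_eq_getElem_cons halen, hd]
        injection hcons with hy hd2
        have hd' : ws.drop (a + 1).toNat = d' := by
          have hn : (a + 1).toNat = a.toNat + 1 := by omega
          rw [hn, hd2]
        rw [PySem.List.pyRange_one_cons (by rw [PySem.List.len_eq]; omega)]
        rw [List.flatMap_cons]
        have hget : PySem.List.pyGetD ws a "" = y := by
          rw [PySem.List.pyGetD_eq_getElem ws "" ha (by omega)]
          exact hy
        rw [hget]
        rw [ih d' (pre ++ [y]) (a + 1) (by omega) hd']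
        have hrest : (PySem.List.pyRange (a + 1) (PySem.List.len ws - ((n : Int) + 1)) 1).flatMap
            (fun i => pvNest js ws n (pre ++ [PySem.List.pyGetD ws i ""]) (i + 1)) =
            pvNest js ws (n + 1) pre (a + 1) := rfl
        rw [hrest, ihd pre (a + 1) (by omega) hd']
        simp only [pvCombs, List.map_append, List.map_map]
        congr 1
        apply List.map_congr_left
        intro c _
        simp

-- A's literal nested folds equal pvNest with empty prefix.
lemma pvBiLoop_eq (ws : List String) (js : String) :
    (PySem.List.pyRange 0 (PySem.List.len ws - 1) 1).foldl (fun lst i =>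
      (PySem.List.pyRange (i + 1) (PySem.List.len ws) 1).foldl (fun lst j =>
        lst ++ [PySem.Str.join js
          [PySem.List.pyGetD ws i "", PySem.List.pyGetD ws j ""]]) lst) [] =
    pvNest js ws 1 [] 0 := by
  simp [pvNest, pvFlatMapEq, pvFlattenMapSingleton]

lemma pvTriLoop_eq (ws : List String) (js : String) :
    (PySem.List.pyRange 0 (PySem.List.len ws - 2) 1).foldl (fun lst i =>
      (PySem.List.pyRange (i + 1) (PySem.List.len ws - 1) 1).foldl (fun lst j =>
        (PySem.List.pyRange (j + 1) (PySem.List.len ws) 1).foldl (fun lst k =>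
          lst ++ [PySem.Str.join js
            [PySem.List.pyGetD ws i "", PySem.List.pyGetD ws j "",
             PySem.List.pyGetD ws k ""]]) lst) lst) [] =
    pvNest js ws 2 [] 0 := by
  simp [pvNest, pvFlatMapEq, pvFlattenMapSingleton]

lemma pvQuadLoop_eq (ws : List String) (js : String) :
    (PySem.List.pyRange 0 (PySem.List.len ws - 3) 1).foldl (fun lst i =>
      (PySem.List.pyRange (i + 1) (PySem.List.len ws - 2) 1).foldl (fun lst j =>
        (PySem.List.pyRange (j + 1) (PySem.List.len ws - 1) 1).foldl (fun lst k =>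
          (PySem.List.pyRange (k + 1) (PySem.List.len ws) 1).foldl (fun lst l =>
            lst ++ [PySem.Str.join js
              [PySem.List.pyGetD ws i "", PySem.List.pyGetD ws j "",
               PySem.List.pyGetD ws k "", PySem.List.pyGetD ws l ""]]) lst) lst) lst) [] =
    pvNest js ws 3 [] 0 := by
  simp [pvNest, pvFlatMapEq, pvFlattenMapSingleton]

lemma pvNest_eq_combs (js : String) (ws : List String) (n : Nat) :
    pvNest js ws n [] 0 = (pvCombs (n + 1) ws).map (fun c => PySem.Str.join js c) := by
  rw [pvMaster js ws n ws [] 0 (by omega) (by simp)]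
  simp

-- ===== VERDICT (by name: the statement is the Claim_ definition above) =====
theorem quadterms_spec : Claim_equal_quadterms := by
  intro words js _
  unfold Spec_quadterms quadterms quadterms_alt
  dsimp only
  by_cases h4 : 4 ≤ words.length
  · rw [if_pos (by rw [PySem.List.len_eq]; omega),
        if_neg (by rw [PySem.List.len_eq]; omega)]
    have hk : (min ((PySem.List.len words)) 4).toNat = 4 := by rw [PySem.List.len_eq]; omega
    rw [hk, pvQuadLoop_eq]
    exact pvNest_eq_combs js words 3
  · unfold triterms
    rw [if_neg (by rw [PySem.List.len_eq]; omega)]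
    by_cases h3 : words.length = 3
    · rw [if_pos (by rw [PySem.List.len_eq]; omega),
          if_neg (by rw [PySem.List.len_eq]; omega)]
      have hk : (min ((PySem.List.len words)) 4).toNat = 3 := by rw [PySem.List.len_eq]; omega
      rw [hk, pvTriLoop_eq]
      exact pvNest_eq_combs js words 2
    · unfold biterms
      rw [if_neg (by rw [PySem.List.len_eq]; omega)]
      by_cases h2 : words.length = 2
      · rw [if_pos (by rw [PySem.List.len_eq]; omega),
            if_neg (by rw [PySem.List.len_eq]; omega)]
        have hk : (min ((PySem.List.len words)) 4).toNat = 2 := by rw [PySem.List.len_eq]; omega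
        rw [hk, pvBiLoop_eq]
        exact pvNest_eq_combs js words 1
      · rw [if_neg (by rw [PySem.List.len_eq]; omega),
            if_pos (by rw [PySem.List.len_eq]; omega)]
        rfl
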